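-- pv_equiv track=rewrite | github.com/tpepels/audio-meta | audio_meta/identity_old.py | _choose_canonical
-- ===== SOURCE A (Python) =====
-- from collections import defaultdict
--
-- def _choose_canonical(variants: list[str]) -> str:
--     """
--     Choose the best canonical form from a list of variants.
--
--     Preference order:
--     1. No comma (avoid "Last, First" format)
--     2. Not all caps
--     3. More words (fuller name)
--     4. Longer (more complete)
--     5. Alphabetically first (for consistency)
--     """
--     if not variants:
--         return ""
--
--     # Count occurrences
--     counts: dict[str, int] = defaultdict(int)
--     for v in variants:
--         counts[v] += 1
--
--     unique = list(counts.keys())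
--
--     def score(name: str) -> tuple:
--         has_comma = 1 if "," in name else 0
--         is_all_caps = 1 if name.isupper() else 0
--         word_count = len([p for p in name.split() if p])
--         length = len(name)
--         frequency = counts[name]
--         return (has_comma, is_all_caps, -word_count, -length, -frequency, name.casefold())
--
--     unique.sort(key=score)
--     return unique[0]
-- ===== SOURCE B (Python) =====
-- def _narrow(pool, f):
--     """Keep only the elements of pool with the minimal f-value (order preserved)."""
--     best = min(f(n) for n in pool)
--     return [n for n in pool if f(n) == best]
--
-- def _choose_canonical(variants: list[str]) -> str:
--     """Successive-narrowing rewrite: filter the unique names by each preference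
--     in turn, then take the casefold-least of what remains (earliest on ties)."""
--     if not variants:
--         return ""
--     counts: dict[str, int] = {}
--     for v in variants:
--         counts[v] = counts.get(v, 0) + 1
--     pool = list(counts)
--     pool = _narrow(pool, lambda n: 1 if "," in n else 0)
--     pool = _narrow(pool, lambda n: 1 if n.isupper() else 0)
--     pool = _narrow(pool, lambda n: -len([p for p in n.split() if p]))
--     pool = _narrow(pool, lambda n: -len(n))
--     pool = _narrow(pool, lambda n: -counts[n])
--     return min(pool, key=str.casefold)
-- ===== Notes on version B (the rewrite author's own statement) =====
-- stated objective: alternative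
-- what changed: A sorts the unique names once by a 6-component preference tuple and takes the head; B never sorts: it narrows the unique list by five successive keep-the-extremal filter passes (comma, all-caps, word count, length, frequency) and returns the casefold-minimum of the survivors.
import Mathlib
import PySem

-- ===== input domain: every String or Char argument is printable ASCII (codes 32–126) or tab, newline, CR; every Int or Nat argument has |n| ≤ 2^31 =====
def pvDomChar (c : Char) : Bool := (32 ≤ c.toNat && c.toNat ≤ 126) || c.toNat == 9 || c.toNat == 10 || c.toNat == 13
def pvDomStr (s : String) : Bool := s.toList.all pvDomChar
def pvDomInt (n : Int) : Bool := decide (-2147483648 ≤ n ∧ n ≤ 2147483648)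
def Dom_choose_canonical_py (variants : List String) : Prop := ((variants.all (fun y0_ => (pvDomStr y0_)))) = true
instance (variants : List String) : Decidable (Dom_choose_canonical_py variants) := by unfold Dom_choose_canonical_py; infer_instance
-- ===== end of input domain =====

-- B replaces A's single stable sort by a 6-tuple key with five successive narrowing
-- passes (keep the candidates extremal for each preference in turn) followed by one
-- casefold-minimum; objective: alternative (same cost, no sort).

-- ===== PORT A =====
-- str.isupper(): at least one cased character and no lowercase one — exact on the ASCII domain
def pyIsupper (s : String) : Bool :=
  s.toList.any PySem.Chars.isupper && s.toList.all (fun c => !PySem.Chars.islower c)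

-- len([p for p in name.split() if p])
def wordCount (s : String) : Int := ((PySem.Str.split₀ s).filter (fun p => p ≠ "")).length

-- A's `score` helper: the Python 6-tuple, encoded as right-nested lexicographic pairs;
-- name.casefold() is PySem.Str.lower — exact on the ASCII domain
def score (counts : PySem.Dict String Int) (name : String) :
    Int ×ₗ Int ×ₗ Int ×ₗ Int ×ₗ Int ×ₗ String :=
  toLex ((if PySem.Str.isIn "," name then (1:Int) else 0),
    toLex ((if pyIsupper name then (1:Int) else 0),
      toLex (-(wordCount name),
        toLex (-(PySem.Str.len name),
          toLex (-(counts.getD name 0), PySem.Str.lower name)))))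

def choose_canonical_py (variants : List String) : String :=
  if variants = [] then ""
  else
    let counts := variants.foldl (fun d v => d.modify v 0 (· + 1)) PySem.Dict.empty
    let unique := counts.keys
    PySem.List.pyGetD (PySem.List.sorted unique (score counts) false) 0 ""

-- ===== PORT B =====
-- `_narrow`: keep the elements of pool whose f-value is minimal (order preserved)
def narrowPool (pool : List String) (f : String → Int) : List String :=
  let best := (PySem.List.min? (pool.map f) (fun v => v)).getD 0
  pool.filter (fun n => f n == best)

def choose_canonical_py_alt (variants : List String) : String :=
  if variants = [] then ""
  else
    let counts := variants.foldl (fun d v => d.insert v (d.getD v 0 + 1)) PySem.Dict.empty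
    let pool0 := counts.keys
    let pool1 := narrowPool pool0 (fun n => if PySem.Str.isIn "," n then 1 else 0)
    let pool2 := narrowPool pool1 (fun n => if pyIsupper n then 1 else 0)
    let pool3 := narrowPool pool2 (fun n => -(wordCount n))
    let pool4 := narrowPool pool3 (fun n => -(PySem.Str.len n))
    let pool5 := narrowPool pool4 (fun n => -(counts.getD n 0))
    PySem.List.minD pool5 (fun n => PySem.Str.lower n) ""

-- ===== PRECONDITION & SPEC =====
def Spec_choose_canonical_py (variants : List String) (out : String) : Prop := out = choose_canonical_py_alt variants
instance (variants : List String) (out : String) : Decidable (Spec_choose_canonical_py variants out) := by unfold Spec_choose_canonical_py; infer_instance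

-- ===== CLAIM (what is proved, stated in full; the proofs are below) =====
def Claim_equal_choose_canonical_py : Prop := ∀ (variants : List String), Dom_choose_canonical_py variants → Spec_choose_canonical_py variants (choose_canonical_py variants)

-- ===== LEMMAS AND PROOFS =====

def fmin {α κ : Type} [LinearOrder κ] (key : α → κ) (m : α) (t : List α) : α :=
  t.foldl (fun m y => if key y < key m then y else m) m

def FirstMin {α κ : Type} [LinearOrder κ] (key : α → κ) (xs : List α) (m : α) : Prop :=
  ∃ pre post, xs = pre ++ m :: post ∧ (∀ y ∈ pre, key m < key y) ∧ (∀ y ∈ post, key m ≤ key y)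

theorem foldl_min_some {α κ : Type} [LinearOrder κ] (key : α → κ) :
    ∀ (t : List α) (m : α),
      t.foldl (fun o x => match o with
        | none => some x
        | some m => if key x < key m then some x else some m) (some m) = some (fmin key m t) := by
  intro t
  induction t with
  | nil => intro m; rfl
  | cons y t ih =>
    intro m
    simp only [List.foldl_cons, fmin]
    by_cases h : key y < key m <;> simp [h, ih, fmin]

theorem min?_cons_eq_fmin {α κ : Type} [LinearOrder κ] (key : α → κ) (x : α) (t : List α) :
    PySem.List.min? (x :: t) key = some (fmin key x t) := by
  show t.foldl _ (some x) = _
  exact foldl_min_some key t x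

theorem fmin_firstMin {α κ : Type} [LinearOrder κ] (key : α → κ) :
    ∀ (t : List α) (m : α), FirstMin key (m :: t) (fmin key m t) := by
  intro t
  induction t with
  | nil => intro m; exact ⟨[], [], rfl, by simp, by simp⟩
  | cons y t ih =>
    intro m
    by_cases h : key y < key m
    · have hf : fmin key m (y :: t) = fmin key y t := by simp [fmin, h]
      obtain ⟨pre, post, hdec, hpre, hpost⟩ := ih y
      have hflt : key (fmin key y t) < key m := by
        cases pre with
        | nil =>
          have hy : fmin key y t = y := by
            have := hdec; simp at this; exact this.1.symm
          rw [hy]; exact h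
        | cons a pre' =>
          rw [List.cons_append] at hdec
          injection hdec with h1 h2
          exact (hpre a (List.mem_cons_self ..)).trans (h1 ▸ h)
      refine ⟨m :: pre, post, ?_, ?_, ?_⟩
      · rw [hf, hdec]; rfl
      · intro z hz
        rcases List.mem_cons.mp hz with rfl | hz
        · rw [hf]; exact hflt
        · rw [hf]; exact hpre z hz
      · intro z hz; rw [hf]; exact hpost z hz
    · have hm : key m ≤ key y := le_of_not_gt h
      have hf : fmin key m (y :: t) = fmin key m t := by simp [fmin, h]
      obtain ⟨pre, post, hdec, hpre, hpost⟩ := ih m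
      cases pre with
      | nil =>
        have hfm : fmin key m t = m := by have := hdec; simp at this; exact this.1.symm
        have hposteq : t = post := by have := hdec; simp [hfm] at this; exact this
        refine ⟨[], y :: post, ?_, by simp, ?_⟩
        · rw [hf, hfm, hposteq]; rfl
        · intro z hz
          rcases List.mem_cons.mp hz with rfl | hz
          · rw [hf, hfm]; exact hm
          · rw [hf]; exact hpost z hz
      | cons a pre' =>
        rw [List.cons_append] at hdec
        injection hdec with h1 h2
        have hfm : key (fmin key m t) < key m := by
          have := hpre a (List.mem_cons_self ..); rwa [← h1] at this
        refine ⟨m :: y :: pre', post, ?_, ?_, ?_⟩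
        · rw [hf]; conv_lhs => rw [h2]
          simp
        · intro z hz
          rcases List.mem_cons.mp hz with rfl | hz
          · rw [hf]; exact hfm
          · rcases List.mem_cons.mp hz with rfl | hz
            · rw [hf]; exact hfm.trans_le hm
            · rw [hf]; exact hpre z (List.mem_cons_of_mem _ hz)
        · intro z hz; rw [hf]; exact hpost z hz

theorem firstMin_unique {α κ : Type} [LinearOrder κ] (key : α → κ) (xs : List α) (m m' : α)
    (h : FirstMin key xs m) (h' : FirstMin key xs m') : m = m' := by
  obtain ⟨pre, post, hdec, hpre, hpost⟩ := h
  obtain ⟨pre', post', hdec', hpre', hpost'⟩ := h'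
  have heq2 : pre ++ m :: post = pre' ++ m' :: post' := hdec.symm.trans hdec'
  have hmem : m' ∈ xs := by rw [hdec']; simp
  have hmem' : m ∈ xs := by rw [hdec]; simp
  have hle : key m ≤ key m' := by
    rw [hdec] at hmem
    rcases List.mem_append.mp hmem with hh | hh
    · exact le_of_lt (hpre _ hh)
    · rcases List.mem_cons.mp hh with rfl | hh
      · exact le_refl _
      · exact hpost _ hh
  have hle' : key m' ≤ key m := by
    rw [hdec'] at hmem'
    rcases List.mem_append.mp hmem' with hh | hh
    · exact le_of_lt (hpre' _ hh)
    · rcases List.mem_cons.mp hh with rfl | hh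
      · exact le_refl _
      · exact hpost' _ hh
  have hkeq : key m = key m' := le_antisymm hle hle'
  have hbase : ∀ i : Nat, (hi : i < pre.length) → (pre ++ m :: post)[i]'(by simp; omega) = pre[i] :=
    fun i hi => List.getElem_append_left hi
  rcases Nat.lt_trichotomy pre.length pre'.length with hlt | heq | hgt
  · exfalso
    have h1 : (pre ++ m :: post)[pre.length]'(by simp) = m := by
      rw [List.getElem_append_right (le_refl _)]; simp
    rw [List.getElem_of_eq heq2] at h1
    rw [List.getElem_append_left hlt] at h1
    have : m ∈ pre' := h1 ▸ List.getElem_mem _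
    have := hpre' m this
    rw [hkeq] at this; exact lt_irrefl _ this
  · have h1 : (pre ++ m :: post)[pre.length]'(by simp) = m := by
      rw [List.getElem_append_right (le_refl _)]; simp
    rw [List.getElem_of_eq heq2] at h1
    rw [List.getElem_append_right (by omega : pre'.length ≤ pre.length)] at h1
    have hz : pre.length - pre'.length = 0 := by omega
    simp [hz] at h1
    exact h1.symm
  · exfalso
    have h1 : (pre' ++ m' :: post')[pre'.length]'(by simp) = m' := by
      rw [List.getElem_append_right (le_refl _)]; simp
    rw [List.getElem_of_eq heq2.symm] at h1
    rw [List.getElem_append_left hgt] at h1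
    have : m' ∈ pre := h1 ▸ List.getElem_mem _
    have := hpre m' this
    rw [hkeq] at this; exact lt_irrefl _ this

theorem head?_insertBy {α : Type} (before : α → α → Bool) (x : α) (acc : List α) :
    (PySem.List.insertBy before x acc).head? =
      some (match acc with | [] => x | y :: _ => if before x y then x else y) := by
  cases acc with
  | nil => simp [PySem.List.insertBy]
  | cons y ys => by_cases h : before x y = true <;> simp [PySem.List.insertBy, h]

theorem head?_foldl_insertBy {α κ : Type} [LinearOrder κ] (key : α → κ) :
    ∀ (xs acc : List α),
      (xs.foldl (fun a x => PySem.List.insertBy (fun p q => decide (key p < key q)) x a) acc).head? =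
        xs.foldl (fun o x => match o with
          | none => some x
          | some m => if key x < key m then some x else some m) acc.head? := by
  intro xs
  induction xs with
  | nil => intro acc; rfl
  | cons x xs ih =>
    intro acc
    simp only [List.foldl_cons]
    rw [ih]
    congr 1
    rw [head?_insertBy]
    cases acc with
    | nil => rfl
    | cons y ys => by_cases h : key x < key y <;> simp [h]

theorem sorted_head?_eq_min? {α κ : Type} [LinearOrder κ] (xs : List α) (key : α → κ) :
    (PySem.List.sorted xs key false).head? = PySem.List.min? xs key := by
  show (xs.foldl (fun a x => PySem.List.insertBy (fun p q => decide (key p < key q)) x a) []).head? = _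
  rw [head?_foldl_insertBy]
  rfl

theorem narrow_step {κ : Type} [LinearOrder κ] (u pool : List String) (K : String → κ)
    (v : κ) (f : String → Int)
    (hpool : pool = u.filter (fun x => decide (K x = v)))
    (hne : pool ≠ []) (hmin : ∀ y ∈ u, v ≤ K y) :
    ∃ w : Int,
      narrowPool pool f = u.filter (fun x => decide (toLex (K x, f x) = toLex (v, w))) ∧
      narrowPool pool f ≠ [] ∧
      (∀ y ∈ u, toLex (v, w) ≤ toLex (K y, f y)) := by
  have hmapne : pool.map f ≠ [] := by simpa using hne
  obtain ⟨w, hw⟩ : ∃ w, PySem.List.min? (pool.map f) (fun v => v) = some w := by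
    cases hmw : PySem.List.min? (pool.map f) (fun v => v) with
    | none => exact absurd ((PySem.List.min?_eq_none_iff _ _).mp hmw) hmapne
    | some w => exact ⟨w, rfl⟩
  have hwmem : w ∈ pool.map f := PySem.List.min?_mem hw
  obtain ⟨n₀, hn₀p, hn₀⟩ := List.mem_map.mp hwmem
  have hwmin : ∀ z ∈ pool.map f, w ≤ z := fun z hz => PySem.List.min?_isMin hw z hz
  have hnp : narrowPool pool f = pool.filter (fun n => f n == w) := by
    unfold narrowPool; rw [hw]; rfl
  refine ⟨w, ?_, ?_, ?_⟩
  · rw [hnp, hpool, List.filter_filter]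
    apply List.filter_congr
    intro x hx
    show (f x == w && decide (K x = v)) = decide (toLex (K x, f x) = toLex (v, w))
    rw [show decide (toLex (K x, f x) = toLex (v, w)) = decide (K x = v ∧ f x = w) from
      decide_eq_decide.mpr (by rw [toLex_inj, Prod.mk.injEq])]
    by_cases h1 : K x = v <;> by_cases h2 : f x = w <;> simp [h1, h2]
  · rw [hnp]
    have : n₀ ∈ pool.filter (fun n => f n == w) := by
      rw [List.mem_filter]; exact ⟨hn₀p, by simp [hn₀]⟩
    exact List.ne_nil_of_mem this
  · intro y hy
    by_cases hK : K y = v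
    · have hyp : y ∈ pool := by
        rw [hpool, List.mem_filter]; exact ⟨hy, by simp [hK]⟩
      have : w ≤ f y := hwmin (f y) (List.mem_map_of_mem hyp)
      rw [Prod.Lex.le_iff]
      right; exact ⟨hK.symm, this⟩
    · have : v < K y := lt_of_le_of_ne (hmin y hy) (fun hh => hK hh.symm)
      rw [Prod.Lex.le_iff]; left; exact this

def Lkey (a1 a2 a3 a4 a5 : Int) : ((((Int ×ₗ Int) ×ₗ Int) ×ₗ Int) ×ₗ Int) ×ₗ Int :=
  toLex (toLex (toLex (toLex (toLex ((0:Int), a1), a2), a3), a4), a5)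

def Rkey (a1 a2 a3 a4 a5 : Int) (s : String) : Int ×ₗ Int ×ₗ Int ×ₗ Int ×ₗ Int ×ₗ String :=
  toLex (a1, toLex (a2, toLex (a3, toLex (a4, toLex (a5, s)))))

theorem bridge_eq (a1 a2 a3 a4 a5 b1 b2 b3 b4 b5 : Int)
    (h : Lkey a1 a2 a3 a4 a5 = Lkey b1 b2 b3 b4 b5) :
    a1 = b1 ∧ a2 = b2 ∧ a3 = b3 ∧ a4 = b4 ∧ a5 = b5 := by
  unfold Lkey at h
  simp only [toLex_inj, Prod.mk.injEq] at h
  exact ⟨h.1.1.1.1.2, h.1.1.1.2, h.1.1.2, h.1.2, h.2⟩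

theorem bridge_lt (a1 a2 a3 a4 a5 b1 b2 b3 b4 b5 : Int) (s t : String)
    (h : Lkey a1 a2 a3 a4 a5 < Lkey b1 b2 b3 b4 b5) :
    Rkey a1 a2 a3 a4 a5 s < Rkey b1 b2 b3 b4 b5 t := by
  unfold Lkey at h
  unfold Rkey
  simp only [Prod.Lex.lt_iff, ofLex_toLex, toLex_inj, Prod.mk.injEq, lt_self_iff_false,
    false_or, true_and] at h ⊢
  tauto

theorem bridge_lt_of_eq (a1 a2 a3 a4 a5 b1 b2 b3 b4 b5 : Int) (s t : String)
    (h : Lkey a1 a2 a3 a4 a5 = Lkey b1 b2 b3 b4 b5) (hs : s < t) :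
    Rkey a1 a2 a3 a4 a5 s < Rkey b1 b2 b3 b4 b5 t := by
  obtain ⟨e1, e2, e3, e4, e5⟩ := bridge_eq _ _ _ _ _ _ _ _ _ _ h
  unfold Rkey
  simp only [Prod.Lex.lt_iff, ofLex_toLex]
  tauto

theorem bridge_le_of_eq (a1 a2 a3 a4 a5 b1 b2 b3 b4 b5 : Int) (s t : String)
    (h : Lkey a1 a2 a3 a4 a5 = Lkey b1 b2 b3 b4 b5) (hs : s ≤ t) :
    Rkey a1 a2 a3 a4 a5 s ≤ Rkey b1 b2 b3 b4 b5 t := by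
  obtain ⟨e1, e2, e3, e4, e5⟩ := bridge_eq _ _ _ _ _ _ _ _ _ _ h
  unfold Rkey
  simp only [Prod.Lex.le_iff, ofLex_toLex]
  tauto

-- the five component scores and the final tiebreak, with the counts dict fixed
def comp1 (n : String) : Int := if PySem.Str.isIn "," n then 1 else 0
def comp2 (n : String) : Int := if pyIsupper n then 1 else 0
def comp3 (n : String) : Int := -(wordCount n)
def comp4 (n : String) : Int := -(PySem.Str.len n)
def comp5 (c : PySem.Dict String Int) (n : String) : Int := -(c.getD n 0)

theorem score_eq_Rkey (c : PySem.Dict String Int) (n : String) :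
    score c n = Rkey (comp1 n) (comp2 n) (comp3 n) (comp4 n) (comp5 c n) (PySem.Str.lower n) := rfl

-- m' = B's survivor of the five narrowing passes + casefold-min is the first
-- score-minimal element of the unique list
theorem lift_firstMin (c : PySem.Dict String Int) (u : List String)
    (K5 : String → ((((Int ×ₗ Int) ×ₗ Int) ×ₗ Int) ×ₗ Int) ×ₗ Int)
    (hK5 : ∀ x, K5 x = Lkey (comp1 x) (comp2 x) (comp3 x) (comp4 x) (comp5 c x))
    (v5 : ((((Int ×ₗ Int) ×ₗ Int) ×ₗ Int) ×ₗ Int) ×ₗ Int)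
    (hmin5 : ∀ y ∈ u, v5 ≤ K5 y)
    (m' : String)
    (hfm : FirstMin (fun n => PySem.Str.lower n) (u.filter (fun x => decide (K5 x = v5))) m') :
    FirstMin (score c) u m' := by
  obtain ⟨preP, postP, hPd, hPpre, hPpost⟩ := hfm
  rw [List.filter_eq_append_iff] at hPd
  obtain ⟨u₁, u₂, hu, hf1, hf2⟩ := hPd
  rw [List.filter_eq_cons_iff] at hf2
  obtain ⟨l₁, l₂, hu2, hl₁, hqm, hfl₂⟩ := hf2
  have hm'K : K5 m' = v5 := by simpa using hqm
  -- strict comparison against any u-element whose prefix key is NOT minimal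
  have hstrict : ∀ y ∈ u, K5 y ≠ v5 → score c m' < score c y := by
    intro y hy hne
    have hlt : v5 < K5 y := lt_of_le_of_ne (hmin5 y hy) (Ne.symm hne)
    rw [← hm'K] at hlt
    rw [score_eq_Rkey, score_eq_Rkey]
    exact bridge_lt _ _ _ _ _ _ _ _ _ _ _ _ (by rw [← hK5 m', ← hK5 y]; exact hlt)
  have hLeq : ∀ y, K5 y = v5 → Lkey (comp1 m') (comp2 m') (comp3 m') (comp4 m') (comp5 c m') =
      Lkey (comp1 y) (comp2 y) (comp3 y) (comp4 y) (comp5 c y) := by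
    intro y hy
    rw [← hK5 m', ← hK5 y, hm'K, hy]
  refine ⟨u₁ ++ l₁, l₂, ?_, ?_, ?_⟩
  · rw [hu, hu2, List.append_assoc]
  · intro y hy
    rcases List.mem_append.mp hy with hy1 | hy1
    · have hyu : y ∈ u := by rw [hu, hu2]; simp [hy1]
      by_cases hq : K5 y = v5
      · have : y ∈ preP := by rw [← hf1, List.mem_filter]; exact ⟨hy1, by simpa using hq⟩
        have hlow := hPpre y this
        rw [score_eq_Rkey, score_eq_Rkey]
        exact bridge_lt_of_eq _ _ _ _ _ _ _ _ _ _ _ _ (hLeq y hq) hlow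
      · exact hstrict y hyu hq
    · have hyu : y ∈ u := by rw [hu, hu2]; simp [hy1]
      have hq : K5 y ≠ v5 := by
        intro hh
        exact absurd (by simpa using hh : (fun x => decide (K5 x = v5)) y = true) (by simpa using hl₁ y hy1)
      exact hstrict y hyu hq
  · intro y hy
    have hyu : y ∈ u := by rw [hu, hu2]; simp [hy]
    by_cases hq : K5 y = v5
    · have : y ∈ postP := by rw [← hfl₂, List.mem_filter]; exact ⟨hy, by simpa using hq⟩
      have hlow := hPpost y this
      rw [score_eq_Rkey, score_eq_Rkey]
      exact bridge_le_of_eq _ _ _ _ _ _ _ _ _ _ _ _ (hLeq y hq) hlow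
    · exact le_of_lt (hstrict y hyu hq)

-- ===== VERDICT (by name: the statement is the Claim_ definition above) =====
theorem choose_canonical_py_spec : Claim_equal_choose_canonical_py := by
  intro variants _
  unfold Spec_choose_canonical_py
  by_cases hv : variants = []
  · rw [hv]; rfl
  · -- rewrite both ports over the shared counter dict
    have hA : choose_canonical_py variants =
        PySem.List.pyGetD (PySem.List.sorted ((PySem.Dict.counter variants).keys)
          (score (PySem.Dict.counter variants)) false) 0 "" := by
      simp only [choose_canonical_py, if_neg hv]
      rw [← PySem.Dict.counter_eq_foldl]
    have hB : choose_canonical_py_alt variants =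
        PySem.List.minD (narrowPool (narrowPool (narrowPool (narrowPool (narrowPool
          ((PySem.Dict.counter variants).keys) comp1) comp2) comp3) comp4)
          (comp5 (PySem.Dict.counter variants))) (fun n => PySem.Str.lower n) "" := by
      simp only [choose_canonical_py_alt, if_neg hv]
      rw [PySem.Dict.foldl_insert_getD_add_one_eq_counter]
      rfl
    set c := PySem.Dict.counter variants with hc
    set u := c.keys with hu
    have hune : u ≠ [] := by
      have hofs : u = PySem.Set.ofList variants := PySem.Dict.keys_counter variants
      obtain ⟨x0, rest, hvar⟩ := List.exists_cons_of_ne_nil hv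
      have hx : x0 ∈ PySem.Set.ofList variants :=
        (PySem.Set.mem_ofList _ _).mpr (by rw [hvar]; simp)
      exact hofs ▸ List.ne_nil_of_mem hx
    have h0 : u = u.filter (fun x => decide ((fun (_ : String) => (0:Int)) x = 0)) := by simp
    obtain ⟨w1, hp1, hne1, hmin1⟩ :=
      narrow_step u u (fun _ => (0:Int)) 0 comp1 h0 hune (fun y _ => le_refl 0)
    obtain ⟨w2, hp2, hne2, hmin2⟩ :=
      narrow_step u (narrowPool u comp1)
        (fun x => toLex ((0:Int), comp1 x)) (toLex (0, w1)) comp2 hp1 hne1 hmin1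
    obtain ⟨w3, hp3, hne3, hmin3⟩ :=
      narrow_step u (narrowPool (narrowPool u comp1) comp2)
        (fun x => toLex (toLex ((0:Int), comp1 x), comp2 x)) (toLex (toLex (0, w1), w2))
        comp3 hp2 hne2 hmin2
    obtain ⟨w4, hp4, hne4, hmin4⟩ :=
      narrow_step u (narrowPool (narrowPool (narrowPool u comp1) comp2) comp3)
        (fun x => toLex (toLex (toLex ((0:Int), comp1 x), comp2 x), comp3 x))
        (toLex (toLex (toLex (0, w1), w2), w3)) comp4 hp3 hne3 hmin3
    obtain ⟨w5, hp5, hne5, hmin5⟩ :=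
      narrow_step u (narrowPool (narrowPool (narrowPool (narrowPool u comp1) comp2) comp3) comp4)
        (fun x => toLex (toLex (toLex (toLex ((0:Int), comp1 x), comp2 x), comp3 x), comp4 x))
        (toLex (toLex (toLex (toLex (0, w1), w2), w3), w4)) (comp5 c) hp4 hne4 hmin4
    obtain ⟨p, t, hpt⟩ := List.exists_cons_of_ne_nil hne5
    have hm'B : PySem.List.minD (narrowPool (narrowPool (narrowPool (narrowPool (narrowPool
        u comp1) comp2) comp3) comp4) (comp5 c)) (fun n => PySem.Str.lower n) "" =
        fmin (fun n => PySem.Str.lower n) p t := by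
      unfold PySem.List.minD
      rw [hpt, min?_cons_eq_fmin]
      rfl
    have hfmB : FirstMin (fun n => PySem.Str.lower n)
        (narrowPool (narrowPool (narrowPool (narrowPool (narrowPool u comp1) comp2) comp3) comp4)
          (comp5 c)) (fmin (fun n => PySem.Str.lower n) p t) := by
      rw [hpt]; exact fmin_firstMin _ t p
    have hlift : FirstMin (score c) u (fmin (fun n => PySem.Str.lower n) p t) :=
      lift_firstMin c u
        (fun x => toLex (toLex (toLex (toLex (toLex ((0:Int), comp1 x), comp2 x), comp3 x), comp4 x), comp5 c x))
        (fun x => rfl)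
        (toLex (toLex (toLex (toLex (toLex ((0:Int), w1), w2), w3), w4), w5))
        hmin5 _ (by rw [← hp5]; exact hfmB)
    obtain ⟨p0, t0, hu0⟩ := List.exists_cons_of_ne_nil hune
    have hminA : PySem.List.min? u (score c) = some (fmin (score c) p0 t0) := by
      rw [hu0]; exact min?_cons_eq_fmin _ p0 t0
    have hsorted : (PySem.List.sorted u (score c) false).head? = some (fmin (score c) p0 t0) := by
      rw [sorted_head?_eq_min?, hminA]
    have hfmA : FirstMin (score c) u (fmin (score c) p0 t0) := by
      rw [hu0]; exact fmin_firstMin _ t0 p0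
    have heqm : fmin (score c) p0 t0 = fmin (fun n => PySem.Str.lower n) p t :=
      firstMin_unique (score c) u _ _ hfmA hlift
    rw [hA, hB, hm'B, ← heqm]
    cases hs : PySem.List.sorted u (score c) false with
    | nil => rw [hs] at hsorted; simp at hsorted
    | cons a rest =>
      rw [hs] at hsorted
      simp only [List.head?_cons, Option.some.injEq] at hsorted
      rw [PySem.List.pyGetD_zero_cons, hsorted]
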